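-- pv_equiv track=rewrite | github.com/DarkVektor/WeightServer | main.py | DataToWeight
-- ===== SOURCE A (Python) =====
-- def DataToWeight(strCOM):
--     s = ""
--     v = ""
--     num = False
--     for c in strCOM:
--         if c.isdigit() or c == '.' or c == ',':
--             num = True
--             s += c
--         elif num and c != ' ':
--             v += c
--     return [s, v]
-- ===== SOURCE B (Python) =====
-- def _isnum(c):
--     return c.isdigit() or c == '.' or c == ','
--
--
-- def _tail(strCOM):
--     # suffix of strCOM starting at the first numeric char ('' if none)
--     for i, c in enumerate(strCOM):
--         if _isnum(c):
--             return strCOM[i:]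
--     return ''
--
--
-- def DataToWeight(strCOM):
--     s = ''.join(c for c in strCOM if _isnum(c))
--     v = ''.join(c for c in _tail(strCOM) if not _isnum(c) and c != ' ')
--     return [s, v]
-- ===== Notes on version B (the rewrite author's own statement) =====
-- stated objective: simpler
-- what changed: Replaced A's single stateful loop with a num flag and two growing accumulators by two independent filter passes: the numeric part is a filter over the whole string, the unit part a filter over the suffix starting at the first numeric character.
import Mathlib
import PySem

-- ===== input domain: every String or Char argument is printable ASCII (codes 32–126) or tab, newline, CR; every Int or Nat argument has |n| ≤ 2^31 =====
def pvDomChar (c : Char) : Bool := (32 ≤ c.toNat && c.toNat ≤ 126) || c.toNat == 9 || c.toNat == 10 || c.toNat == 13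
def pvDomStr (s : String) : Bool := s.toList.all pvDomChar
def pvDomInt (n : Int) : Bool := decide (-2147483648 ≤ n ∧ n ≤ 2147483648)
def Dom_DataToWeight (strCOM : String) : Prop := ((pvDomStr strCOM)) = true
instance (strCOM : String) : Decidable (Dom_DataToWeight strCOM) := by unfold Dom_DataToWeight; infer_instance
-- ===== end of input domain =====

-- B replaces A's single stateful loop (flag `num`) by two independent filters: the numeric
-- part is a filter over the whole string, the unit part a filter over the suffix starting at
-- the first numeric character; objective: simpler.

-- ===== PORT A =====
-- one fold carrying the loop state (s, v, num), branches in A's order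
def pvStepA (st : String × String × Bool) (c : Char) : String × String × Bool :=
  if PySem.Chars.isdigit c || c == '.' || c == ',' then (st.1.push c, st.2.1, true)
  else if st.2.2 && !(c == ' ') then (st.1, st.2.1.push c, st.2.2)
  else st

def DataToWeight (strCOM : String) : List String :=
  let r := strCOM.toList.foldl pvStepA ("", "", false)
  [r.1, r.2.1]

-- ===== PORT B =====
def pvIsNum (c : Char) : Bool := PySem.Chars.isdigit c || c == '.' || c == ','

-- Source B's _tail: suffix from the first numeric character ([] if none)
def pvTail (cs : List Char) : List Char :=
  match cs with
  | [] => []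
  | c :: rest => if pvIsNum c then c :: rest else pvTail rest

def DataToWeight_alt (strCOM : String) : List String :=
  let cs := strCOM.toList
  [String.ofList (cs.filter pvIsNum),
   String.ofList ((pvTail cs).filter (fun c => !pvIsNum c && !(c == ' ')))]

-- ===== PRECONDITION & SPEC =====
def Spec_DataToWeight (strCOM : String) (out : List String) : Prop := out = DataToWeight_alt strCOM
instance (strCOM : String) (out : List String) : Decidable (Spec_DataToWeight strCOM out) := by unfold Spec_DataToWeight; infer_instance

-- ===== CLAIM (what is proved, stated in full; the proofs are below) =====
def Claim_equal_DataToWeight : Prop := ∀ (strCOM : String), Dom_DataToWeight strCOM → Spec_DataToWeight strCOM (DataToWeight strCOM)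

-- ===== LEMMAS AND PROOFS =====

theorem pvPushAppend (s : String) (c : Char) (xs : List Char) :
    s.push c ++ String.ofList xs = s ++ String.ofList (c :: xs) :=
  String.toList_inj.mp (by simp)

theorem pvStepA_num {c : Char} (st : String × String × Bool) (h : pvIsNum c = true) :
    pvStepA st c = (st.1.push c, st.2.1, true) := by
  simp [pvStepA, show (PySem.Chars.isdigit c || c == '.' || c == ',') = true from h]

theorem pvStepA_not {c : Char} (st : String × String × Bool) (h : pvIsNum c = false) :
    pvStepA st c = if st.2.2 && !(c == ' ') then (st.1, st.2.1.push c, st.2.2) else st := by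
  simp [pvStepA, show (PySem.Chars.isdigit c || c == '.' || c == ',') = false from h]

-- once the flag is true, the loop appends the two filters of the rest
theorem pvFoldTrue (cs : List Char) (s v : String) :
    cs.foldl pvStepA (s, v, true) =
      (s ++ String.ofList (cs.filter pvIsNum),
       v ++ String.ofList (cs.filter (fun c => !pvIsNum c && !(c == ' '))), true) := by
  induction cs generalizing s v with
  | nil => simp
  | cons c cs ih =>
    by_cases h : pvIsNum c = true
    · simp [pvStepA_num _ h, h, ih, pvPushAppend]
    · rw [Bool.not_eq_true] at h
      by_cases hs : c = ' '
      · subst hs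
        rw [List.foldl_cons, pvStepA_not _ h]
        simp [h, ih]
      · simp [pvStepA_not _ h, h, hs, ih, pvPushAppend]

-- while the flag is false, s and v stay until the first numeric char
theorem pvFoldFalse (cs : List Char) (s v : String) :
    ((cs.foldl pvStepA (s, v, false)).1,
     (cs.foldl pvStepA (s, v, false)).2.1) =
      (s ++ String.ofList (cs.filter pvIsNum),
       v ++ String.ofList ((pvTail cs).filter (fun c => !pvIsNum c && !(c == ' ')))) := by
  induction cs generalizing s v with
  | nil => simp [pvTail]
  | cons c cs ih =>
    by_cases h : pvIsNum c = true
    · simp [pvStepA_num _ h, pvTail, h, pvFoldTrue, pvPushAppend]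
    · rw [Bool.not_eq_true] at h
      simp [pvStepA_not _ h, pvTail, h, ih]

-- ===== VERDICT (by name: the statement is the Claim_ definition above) =====
theorem DataToWeight_spec : Claim_equal_DataToWeight := by
  intro strCOM _
  unfold Spec_DataToWeight DataToWeight DataToWeight_alt
  have h := pvFoldFalse strCOM.toList "" ""
  simp only [Prod.mk.injEq] at h
  simp [h.1, h.2]
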